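-- pv_equiv track=rewrite | github.com/mudrikmohdiddi/Very-simple-exercises | Q25.py | make_ing_form
-- ===== SOURCE A (Python) =====
-- def make_ing_form(verb):
--     new_verb=""
--     if(verb.endswith("e")):
--         if(verb=="be" or verb=="see" or verb=="flee" or verb=="knee"):
--             return verb+"ing"
--         else:
--             new_verb=verb.removesuffix("e")+"ing"
--             return new_verb
--     elif(verb.endswith("ie")):
--         new_verb=verb.removesuffix("ie")+"y"+"ing"
--     else:
--         co_vo_co=""
--         vowel="aeiou"
--         for i in verb:
--             if(i in vowel):
--                 co_vo_co+="vo"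
--             else:
--                 co_vo_co+="co"
--         if("covoco" in co_vo_co):
--             return verb+verb[len(verb)-1]+"ing"
--         else:
--             return verb+"ing"
-- ===== SOURCE B (Python) =====
-- def make_ing_form(verb):
--     vowels = "aeiou"
--     if verb.endswith("e"):
--         if verb in ("be", "see", "flee", "knee"):
--             return verb + "ing"
--         return verb[:-1] + "ing"
--     if any(a not in vowels and b in vowels and c not in vowels
--            for a, b, c in zip(verb, verb[1:], verb[2:])):
--         return verb + verb[-1] + "ing"
--     return verb + "ing"
-- ===== Notes on version B (the rewrite author's own statement) =====
-- stated objective: simpler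
-- what changed: B drops the dead second suffix branch (unreachable because the final-e test runs first) and replaces A's construction of an auxiliary consonant/vowel pattern string plus substring search with a direct any() scan over consecutive consonant-vowel-consonant character triples.
import Mathlib
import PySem

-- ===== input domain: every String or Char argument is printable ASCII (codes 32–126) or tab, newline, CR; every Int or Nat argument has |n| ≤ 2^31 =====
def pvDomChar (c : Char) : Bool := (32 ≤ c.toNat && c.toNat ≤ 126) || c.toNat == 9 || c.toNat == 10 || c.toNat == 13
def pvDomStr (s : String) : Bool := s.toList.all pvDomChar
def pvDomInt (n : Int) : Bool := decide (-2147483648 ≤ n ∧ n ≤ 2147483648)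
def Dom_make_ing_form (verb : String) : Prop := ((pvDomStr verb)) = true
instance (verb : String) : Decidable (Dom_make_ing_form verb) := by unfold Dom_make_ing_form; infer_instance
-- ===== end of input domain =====

-- B simplifies A: the dead second suffix branch is dropped and the auxiliary pattern-string
-- construction + substring search is replaced by a direct scan for a consonant-vowel-consonant
-- character triple.


-- ===== PORT A =====
-- hand port of str.removesuffix (not in PySem): drop the suffix if present, exact
def pvRemovesuffix (cs suf : List Char) : List Char :=
  if suf <:+ cs then cs.take (cs.length - suf.length) else cs

def make_ing_form (verb : String) : String :=
  let cs := verb.toList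
  if PySem.Chars.endswith cs ['e'] then
    if verb == "be" || verb == "see" || verb == "flee" || verb == "knee" then
      String.ofList (cs ++ ['i', 'n', 'g'])
    else
      String.ofList (pvRemovesuffix cs ['e'] ++ ['i', 'n', 'g'])
  else if PySem.Chars.endswith cs ['i', 'e'] then
    -- unreachable for every input (endswith "ie" implies endswith "e");
    -- Python assigns new_verb here and falls off; we return that new_verb
    String.ofList (pvRemovesuffix cs ['i', 'e'] ++ ['y', 'i', 'n', 'g'])
  else
    -- the co_vo_co accumulation loop, then the 'covoco' substring test
    let covo := cs.foldl
      (fun acc c => acc ++ (if ['a', 'e', 'i', 'o', 'u'].contains c then ['v', 'o'] else ['c', 'o'])) []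
    if PySem.Chars.isIn ['c', 'o', 'v', 'o', 'c', 'o'] covo then
      -- verb[len(verb)-1]; the none case is unreachable (the pattern forces len ≥ 3)
      String.ofList (cs ++ (PySem.List.pyGet? cs ((cs.length : Int) - 1)).toList ++ ['i', 'n', 'g'])
    else
      String.ofList (cs ++ ['i', 'n', 'g'])

-- ===== PORT B =====
def make_ing_form_alt (verb : String) : String :=
  let cs := verb.toList
  if PySem.Chars.endswith cs ['e'] then
    if verb == "be" || verb == "see" || verb == "flee" || verb == "knee" then
      String.ofList (cs ++ ['i', 'n', 'g'])
    else
      -- verb[:-1]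
      String.ofList (PySem.List.slice cs none (some (-1)) ++ ['i', 'n', 'g'])
  else
    -- any(... for a, b, c in zip(verb, verb[1:], verb[2:]))
    let triples := (cs.zip (cs.drop 1)).zip (cs.drop 2)
    if triples.any (fun t =>
        !(['a', 'e', 'i', 'o', 'u'].contains t.1.1) &&
        (['a', 'e', 'i', 'o', 'u'].contains t.1.2) &&
        !(['a', 'e', 'i', 'o', 'u'].contains t.2)) then
      -- verb[-1]; the none case is unreachable (a triple forces len ≥ 3)
      String.ofList (cs ++ (PySem.List.pyGet? cs (-1)).toList ++ ['i', 'n', 'g'])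
    else
      String.ofList (cs ++ ['i', 'n', 'g'])

-- ===== PRECONDITION & SPEC =====
def Spec_make_ing_form (verb : String) (out : String) : Prop := out = make_ing_form_alt verb
instance (verb : String) (out : String) : Decidable (Spec_make_ing_form verb out) := by unfold Spec_make_ing_form; infer_instance

-- ===== CLAIM (what is proved, stated in full; the proofs are below) =====
def Claim_equal_make_ing_form : Prop := ∀ (verb : String), Dom_make_ing_form verb → Spec_make_ing_form verb (make_ing_form verb)

-- ===== LEMMAS AND PROOFS =====
def pvIsV (c : Char) : Bool := ['a', 'e', 'i', 'o', 'u'].contains c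

def pvTok (c : Char) : List Char := if pvIsV c then ['v', 'o'] else ['c', 'o']

def pvScan3 : List Char → Bool
  | a :: b :: c :: r => (!pvIsV a && pvIsV b && !pvIsV c) || pvScan3 (b :: c :: r)
  | _ => false

theorem pv_infix_flatMap (cs : List Char) :
    (['c', 'o', 'v', 'o', 'c', 'o'] <:+: cs.flatMap pvTok) ↔ pvScan3 cs = true := by
  induction cs with
  | nil => simp [pvScan3]
  | cons a rest ih =>
    rcases rest with _ | ⟨b, rest2⟩
    · constructor
      · intro h
        have hl := List.IsInfix.length_le h
        cases hva : pvIsV a <;> simp [pvTok, hva] at hl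
      · intro h; simp [pvScan3] at h
    rcases rest2 with _ | ⟨c, r⟩
    · constructor
      · intro h
        have hl := List.IsInfix.length_le h
        cases hva : pvIsV a <;> cases hvb : pvIsV b <;> simp [pvTok, hva, hvb] at hl
      · intro h; simp [pvScan3] at h
    · rw [pvScan3]
      constructor
      · intro h
        rw [show (a :: b :: c :: r).flatMap pvTok =
              pvTok a ++ (b :: c :: r).flatMap pvTok by simp] at h
        cases hva : pvIsV a <;>
          simp only [pvTok, hva, Bool.false_eq_true, if_false, if_true] at h
        · -- a consonant: pvTok a = ['c','o']
          rw [List.cons_append, List.cons_append, List.nil_append,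
            List.infix_cons_iff, List.infix_cons_iff] at h
          rcases h with h | h | h
          · -- prefix occurrence at the front: forces b vowel, c consonant
            rw [List.cons_prefix_cons, List.cons_prefix_cons] at h
            obtain ⟨-, -, h⟩ := h
            rw [show (b :: c :: r).flatMap pvTok = pvTok b ++ (pvTok c ++ r.flatMap pvTok)
                  by simp] at h
            cases hvb : pvIsV b <;>
              simp only [pvTok, hvb, Bool.false_eq_true, if_false, if_true] at h
            · simp [List.cons_prefix_cons] at h
            · rw [List.cons_append, List.cons_append, List.nil_append,
                List.cons_prefix_cons, List.cons_prefix_cons] at h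
              obtain ⟨-, -, h⟩ := h
              cases hvc : pvIsV c <;>
                simp only [hvc, Bool.false_eq_true, if_false, if_true] at h
              · simp
              · simp [List.cons_prefix_cons] at h
          · simp [List.cons_prefix_cons] at h
          · rw [ih.1 h]; simp
        · -- a vowel: pvTok a = ['v','o'], any occurrence lies in the tail
          rw [List.cons_append, List.cons_append, List.nil_append,
            List.infix_cons_iff, List.infix_cons_iff] at h
          rcases h with h | h | h
          · simp [List.cons_prefix_cons] at h
          · simp [List.cons_prefix_cons] at h
          · rw [ih.1 h]; simp
      · intro h
        rcases Bool.or_eq_true_iff.1 h with h | h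
        · simp only [Bool.and_eq_true, Bool.not_eq_eq_eq_not, Bool.not_true] at h
          obtain ⟨⟨hva, hvb⟩, hvc⟩ := h
          refine List.IsPrefix.isInfix ?_
          simp [pvTok, hva, hvb, hvc, List.cons_prefix_cons]
        · refine List.IsInfix.trans (ih.2 h) ?_
          rw [show (a :: b :: c :: r).flatMap pvTok =
                pvTok a ++ (b :: c :: r).flatMap pvTok by simp]
          exact (List.suffix_append _ _).isInfix

theorem pv_zip_any (cs : List Char) :
    ((cs.zip (cs.drop 1)).zip (cs.drop 2)).any (fun t =>
        !(['a', 'e', 'i', 'o', 'u'].contains t.1.1) &&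
        (['a', 'e', 'i', 'o', 'u'].contains t.1.2) &&
        !(['a', 'e', 'i', 'o', 'u'].contains t.2)) = pvScan3 cs := by
  induction cs with
  | nil => simp [pvScan3]
  | cons a rest ih =>
    rcases rest with _ | ⟨b, rest2⟩
    · simp [pvScan3]
    rcases rest2 with _ | ⟨c, r⟩
    · simp [pvScan3]
    · rw [pvScan3]
      simp only [List.drop_succ_cons, List.drop_zero, List.zip_cons_cons,
        List.any_cons] at ih ⊢
      rw [← ih]
      simp [pvIsV, Bool.and_assoc]

theorem pv_last_eq (cs : List Char) (h : cs ≠ []) :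
    PySem.List.pyGet? cs ((cs.length : Int) - 1) = PySem.List.pyGet? cs (-1) := by
  have hlen : 1 ≤ cs.length := List.length_pos_of_ne_nil h
  have hidx : PySem.List.pyIdx? cs.length ((cs.length : Int) - 1) =
      PySem.List.pyIdx? cs.length (-1) := by
    simp only [PySem.List.pyIdx?]
    rw [if_pos (by omega), if_pos (by omega), if_neg (by omega), if_pos (by omega)]
    congr 1
    omega
  simp only [PySem.List.pyGet?, hidx]

theorem pv_slice_neg_one (cs : List Char) :
    PySem.List.slice cs none (some (-1)) = cs.take (cs.length - 1) := by
  simp only [PySem.List.slice, PySem.List.clampIdx]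
  split_ifs <;> (try rw [List.drop_zero]) <;> (try congr 1) <;> omega

-- ===== VERDICT (by name: the statement is the Claim_ definition above) =====
theorem make_ing_form_spec : Claim_equal_make_ing_form := by
  intro verb _
  unfold Spec_make_ing_form make_ing_form make_ing_form_alt
  set cs := verb.toList with hcs
  by_cases he : PySem.Chars.endswith cs ['e']
  · simp only [he, if_true]
    by_cases hw : (verb == "be" || verb == "see" || verb == "flee" || verb == "knee") = true
    · simp [hw]
    · simp only [hw, if_false, Bool.false_eq_true]
      have hsuf : ['e'] <:+ cs := (PySem.Chars.endswith_iff cs ['e']).1 he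
      rw [pvRemovesuffix, if_pos hsuf, pv_slice_neg_one]
      simp
  · have hie : PySem.Chars.endswith cs ['i', 'e'] = false := by
      apply Bool.eq_false_iff.2
      intro hc
      apply he
      obtain ⟨t, ht⟩ := (PySem.Chars.endswith_iff cs ['i', 'e']).1 hc
      exact (PySem.Chars.endswith_iff cs ['e']).2 ⟨t ++ ['i'], by simp [← ht]⟩
    simp only [Bool.not_eq_true] at he
    simp only [he, hie, Bool.false_eq_true, if_false]
    rw [PySem.List.foldl_append_eq_flatMap, List.nil_append]
    have hfun : (fun c => if ['a', 'e', 'i', 'o', 'u'].contains c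
        then ['v', 'o'] else ['c', 'o']) = pvTok := by
      funext x; simp [pvTok, pvIsV]
    rw [hfun, pv_zip_any]
    by_cases hsc : pvScan3 cs = true
    · have hin : PySem.Chars.isIn ['c', 'o', 'v', 'o', 'c', 'o'] (cs.flatMap pvTok) = true :=
        (PySem.Chars.isIn_iff_infix _ _).2 ((pv_infix_flatMap cs).2 hsc)
      have hne : cs ≠ [] := by
        intro hnil; rw [hnil] at hsc; simp [pvScan3] at hsc
      simp only [hin, hsc, if_true, pv_last_eq cs hne]
    · have hin : PySem.Chars.isIn ['c', 'o', 'v', 'o', 'c', 'o'] (cs.flatMap pvTok) = false :=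
        (PySem.Chars.isIn_eq_false_iff _ _).2 (fun hc => hsc ((pv_infix_flatMap cs).1 hc))
      simp only [hin, hsc, Bool.false_eq_true, if_false]
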